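-- pv_equiv track=rewrite | github.com/navig-run/core | navig/agent/context_compressor.py | _get_context_window
-- ===== SOURCE A (Python) =====
-- _MODEL_CONTEXT_WINDOWS: dict[str, int] = {
--     "gpt-4o": 128_000,
--     "gpt-4o-mini": 128_000,
--     "gpt-4-turbo": 128_000,
--     "gpt-4.1": 1_000_000,
--     "gpt-4.1-mini": 1_000_000,
--     "claude-sonnet-4-20250514": 200_000,
--     "claude-3-5-sonnet": 200_000,
--     "claude-3-haiku": 200_000,
--     "claude-3-opus": 200_000,
--     "claude-opus-4-20250514": 200_000,
--     "deepseek-chat": 128_000,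
--     "deepseek-reasoner": 128_000,
--     "gemini-2.5-flash": 1_000_000,
--     "gemini-2.5-pro": 1_000_000,
-- }
--
-- def _get_context_window(model: str) -> int:
--     """Look up or estimate context window for *model*."""
--     # Exact match
--     if model in _MODEL_CONTEXT_WINDOWS:
--         return _MODEL_CONTEXT_WINDOWS[model]
--     # Prefix match (e.g. "claude-3-5-sonnet-20241022")
--     for prefix, size in _MODEL_CONTEXT_WINDOWS.items():
--         if model.startswith(prefix):
--             return size
--     # Check for provider/model format like "openai/gpt-4o"
--     if "/" in model:
--         bare = model.split("/", 1)[1]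
--         return _get_context_window(bare)
--     # Safe default
--     return 128_000
-- ===== SOURCE B (Python) =====
-- _MODEL_CONTEXT_WINDOWS: dict[str, int] = {
--     "gpt-4o": 128_000,
--     "gpt-4o-mini": 128_000,
--     "gpt-4-turbo": 128_000,
--     "gpt-4.1": 1_000_000,
--     "gpt-4.1-mini": 1_000_000,
--     "claude-sonnet-4-20250514": 200_000,
--     "claude-3-5-sonnet": 200_000,
--     "claude-3-haiku": 200_000,
--     "claude-3-opus": 200_000,
--     "claude-opus-4-20250514": 200_000,
--     "deepseek-chat": 128_000,
--     "deepseek-reasoner": 128_000,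
--     "gemini-2.5-flash": 1_000_000,
--     "gemini-2.5-pro": 1_000_000,
-- }
--
-- def _get_context_window(model: str) -> int:
--     """Look up or estimate context window for *model*."""
--     # Split once on '/', then try every suffix candidate (drop one leading
--     # provider segment at a time) instead of recursing on split("/", 1)[1].
--     parts = model.split("/")
--     for i in range(len(parts)):
--         cand = "/".join(parts[i:])
--         if cand in _MODEL_CONTEXT_WINDOWS:
--             return _MODEL_CONTEXT_WINDOWS[cand]
--         for prefix, size in _MODEL_CONTEXT_WINDOWS.items():
--             if cand.startswith(prefix):
--                 return size
--     return 128_000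
-- ===== Notes on version B (the rewrite author's own statement) =====
-- stated objective: alternative
-- what changed: Replaces A's tail recursion on split('/',1)[1] by a single upfront split('/') followed by one loop over the suffix candidates rebuilt with '/'.join(parts[i:]).
import Mathlib
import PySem

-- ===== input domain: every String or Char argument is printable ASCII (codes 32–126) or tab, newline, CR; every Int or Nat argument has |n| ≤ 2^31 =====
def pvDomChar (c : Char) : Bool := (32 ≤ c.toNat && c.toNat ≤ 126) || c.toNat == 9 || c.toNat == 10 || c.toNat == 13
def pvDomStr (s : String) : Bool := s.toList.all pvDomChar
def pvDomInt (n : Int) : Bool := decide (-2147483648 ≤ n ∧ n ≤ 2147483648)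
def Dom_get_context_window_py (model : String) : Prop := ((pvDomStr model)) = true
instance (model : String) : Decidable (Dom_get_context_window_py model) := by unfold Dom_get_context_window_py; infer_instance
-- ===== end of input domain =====

-- B replaces A's tail recursion on model.split("/", 1)[1] by one upfront split("/")
-- and a single loop over the suffix candidates "/".join(parts[i:]); same cost, different decomposition.

-- ===== PORT A =====
-- the module-level dict _MODEL_CONTEXT_WINDOWS (shared by A and B, as in Python; keys as List Char)
def pvModelContextWindows : PySem.Dict (List Char) Int :=
  PySem.Dict.ofList [
    ("gpt-4o".toList, 128000),
    ("gpt-4o-mini".toList, 128000),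
    ("gpt-4-turbo".toList, 128000),
    ("gpt-4.1".toList, 1000000),
    ("gpt-4.1-mini".toList, 1000000),
    ("claude-sonnet-4-20250514".toList, 200000),
    ("claude-3-5-sonnet".toList, 200000),
    ("claude-3-haiku".toList, 200000),
    ("claude-3-opus".toList, 200000),
    ("claude-opus-4-20250514".toList, 200000),
    ("deepseek-chat".toList, 128000),
    ("deepseek-reasoner".toList, 128000),
    ("gemini-2.5-flash".toList, 1000000),
    ("gemini-2.5-pro".toList, 1000000)]

-- termination helpers for port A (cited by its decreasing_by; exact characterizations of split)
theorem pv_decomp (cs : List Char) (h : '/' ∈ cs) :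
    cs.takeWhile (· ≠ '/') ++ '/' :: (cs.dropWhile (· ≠ '/')).tail = cs := by
  induction cs with
  | nil => cases h
  | cons c rest ih =>
    by_cases hc : c = '/'
    · subst hc; simp [List.takeWhile, List.dropWhile]
    · simp only [List.takeWhile_cons, List.dropWhile_cons]
      have h' : '/' ∈ rest := by
        cases h with
        | head => exact absurd rfl hc
        | tail _ h => exact h
      simp [hc]
      simpa using ih h'

-- go of splitOnMax with maxsplit exhausted: the rest is one final piece
theorem pv_goMax0 (cs : List Char) (fuel : Nat) (cur : List Char) (acc : List (List Char))
    (hf : cs.length ≤ fuel) :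
    PySem.Chars.splitOnMax.go ['/'] fuel 0 cs cur acc = acc.reverse ++ [cur.reverse ++ cs] := by
  match fuel, cs with
  | 0, cs =>
    have : cs = [] := List.eq_nil_of_length_eq_zero (Nat.le_zero.mp hf)
    subst this; simp [PySem.Chars.splitOnMax.go]
  | fuel+1, [] => simp [PySem.Chars.splitOnMax.go]
  | fuel+1, c :: rest => simp [PySem.Chars.splitOnMax.go]

-- go of splitOnMax with maxsplit = 1, sep "/": split at the first '/' only
theorem pv_goMax1 (cs : List Char) : ∀ (fuel : Nat) (cur : List Char) (acc : List (List Char)),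
    cs.length ≤ fuel →
    PySem.Chars.splitOnMax.go ['/'] fuel 1 cs cur acc =
      acc.reverse ++ (if '/' ∈ cs then
        [cur.reverse ++ cs.takeWhile (· ≠ '/'), (cs.dropWhile (· ≠ '/')).tail]
      else [cur.reverse ++ cs]) := by
  induction cs with
  | nil => intro fuel cur acc _
           match fuel with
           | 0 => simp [PySem.Chars.splitOnMax.go]
           | fuel+1 => simp [PySem.Chars.splitOnMax.go]
  | cons c rest ih =>
    intro fuel cur acc hf
    match fuel with
    | 0 => exact absurd hf (by simp)
    | fuel+1 =>
      by_cases hc : c = '/'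
      · subst hc
        rw [PySem.Chars.splitOnMax.go]
        simp only [List.isPrefixOf, Bool.and_true, beq_self_eq_true,
          if_true, if_neg (by omega : ¬ (1:Nat) = 0)]
        show PySem.Chars.splitOnMax.go ['/'] fuel 0 rest [] (cur.reverse :: acc) = _
        rw [pv_goMax0 rest fuel (cur := []) (acc := cur.reverse :: acc) (by simpa using hf)]
        simp [List.takeWhile, List.dropWhile]
      · rw [PySem.Chars.splitOnMax.go]
        have hpre : (['/'].isPrefixOf (c :: rest)) = false := by
          simp [List.isPrefixOf, Ne.symm hc]
        simp only [hpre, if_neg (by omega : ¬ (1:Nat) = 0), Bool.false_eq_true, if_false]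
        rw [ih fuel (c :: cur) acc (by simpa using Nat.le_of_succ_le_succ hf)]
        by_cases hm : '/' ∈ rest
        · have : '/' ∈ c :: rest := List.mem_cons_of_mem c hm
          simp [hm, this, List.takeWhile_cons, List.dropWhile_cons]
          exact ⟨hc, by simp [hc]⟩
        · have : '/' ∉ c :: rest := by simp [hm, Ne.symm hc]
          simp [hm, this]

theorem pv_splitOnMax1_of_mem (cs : List Char) (h : '/' ∈ cs) :
    PySem.Chars.splitOnMax cs ['/'] 1 =
      [cs.takeWhile (· ≠ '/'), (cs.dropWhile (· ≠ '/')).tail] := by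
  unfold PySem.Chars.splitOnMax
  rw [if_neg (by omega)]
  have h1 : (1:Int).toNat = 1 := rfl
  rw [h1, pv_goMax1 cs (cs.length + 1) [] [] (by omega)]
  simp [h]

theorem pv_tail_lt (cs : List Char) (h : '/' ∈ cs) :
    ((cs.dropWhile (· ≠ '/')).tail).length < cs.length := by
  have := congrArg List.length (pv_decomp cs h)
  rw [List.length_append, List.length_cons] at this
  omega

theorem pv_isIn_slash (cs : List Char) : (PySem.Chars.isIn ['/'] cs = true) ↔ '/' ∈ cs := by
  rw [PySem.Chars.isIn_iff_infix]; exact List.singleton_infix_iff '/' cs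

theorem pv_bare_lt (cs : List Char) (h : PySem.Chars.isIn ['/'] cs = true) :
    ((PySem.List.pyGet? (PySem.Chars.splitOnMax cs ['/'] 1) 1).getD []).length < cs.length := by
  have hm : '/' ∈ cs := (pv_isIn_slash cs).mp h
  rw [pv_splitOnMax1_of_mem cs hm]
  have : PySem.List.pyGet? [cs.takeWhile (· ≠ '/'), (cs.dropWhile (· ≠ '/')).tail] (1:Int)
      = some ((cs.dropWhile (· ≠ '/')).tail) := by
    simp [PySem.List.pyGet?, PySem.List.pyIdx?]
  rw [this]
  simpa using pv_tail_lt cs hm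

-- Port A: the recursive _get_context_window, on the code-point list
def pvGoA (cs : List Char) : Int :=
  -- if model in _MODEL_CONTEXT_WINDOWS: return _MODEL_CONTEXT_WINDOWS[model]
  match pvModelContextWindows.get? cs with
  | some v => v
  | none =>
    -- for prefix, size in _MODEL_CONTEXT_WINDOWS.items(): if model.startswith(prefix): return size
    match pvModelContextWindows.items.find? (fun p => PySem.Chars.startswith cs p.1) with
    | some p => p.2
    | none =>
      -- if "/" in model: return _get_context_window(model.split("/", 1)[1])
      if h : PySem.Chars.isIn ['/'] cs then
        pvGoA ((PySem.List.pyGet? (PySem.Chars.splitOnMax cs ['/'] 1) 1).getD [])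
      else 128000
termination_by cs.length
decreasing_by exact pv_bare_lt cs h

def get_context_window_py (model : String) : Int := pvGoA model.toList

-- ===== PORT B =====
-- B's loop over range(len(parts)) with cand = "/".join(parts[i:]), as recursion on the suffix list
def pvGoB : List (List Char) → Int
  | [] => 128000
  | p :: rest =>
    let cand := PySem.Chars.join ['/'] (p :: rest)
    match pvModelContextWindows.get? cand with
    | some v => v
    | none =>
      match pvModelContextWindows.items.find? (fun q => PySem.Chars.startswith cand q.1) with
      | some q => q.2
      | none => pvGoB rest

def get_context_window_py_alt (model : String) : Int :=
  pvGoB (PySem.Chars.splitOn model.toList ['/'])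

-- ===== PRECONDITION & SPEC =====
def Spec_get_context_window_py (model : String) (out : Int) : Prop := out = get_context_window_py_alt model
instance (model : String) (out : Int) : Decidable (Spec_get_context_window_py model out) := by unfold Spec_get_context_window_py; infer_instance

-- ===== CLAIM (what is proved, stated in full; the proofs are below) =====
def Claim_equal_get_context_window_py : Prop := ∀ (model : String), Dom_get_context_window_py model → Spec_get_context_window_py model (get_context_window_py model)

-- ===== LEMMAS AND PROOFS =====
theorem pv_takeWhile_of_not_mem (cs : List Char) (h : '/' ∉ cs) :
    cs.takeWhile (· ≠ '/') = cs := by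
  rw [List.takeWhile_eq_self_iff]
  intro x hx
  simp only [ne_eq, decide_not, Bool.not_eq_true', decide_eq_false_iff_not]
  exact fun he => h (he ▸ hx)

-- characterization of splitOn.go with sep "/"
theorem pv_goSplit (cs : List Char) : ∀ (fuel : Nat) (cur : List Char) (acc : List (List Char)),
    cs.length ≤ fuel →
    PySem.Chars.splitOn.go ['/'] fuel cs cur acc =
      acc.reverse ++ (cur.reverse ++ cs.takeWhile (· ≠ '/')) ::
        (if '/' ∈ cs then PySem.Chars.splitOn ((cs.dropWhile (· ≠ '/')).tail) ['/'] else []) := by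
  induction cs with
  | nil => intro fuel cur acc _
           match fuel with
           | 0 => simp [PySem.Chars.splitOn.go]
           | fuel+1 => simp [PySem.Chars.splitOn.go]
  | cons c rest ih =>
    intro fuel cur acc hf
    match fuel with
    | 0 => exact absurd hf (by simp)
    | fuel+1 =>
      by_cases hc : c = '/'
      · subst hc
        rw [PySem.Chars.splitOn.go]
        simp only [List.isPrefixOf, Bool.and_true, beq_self_eq_true,
          if_true]
        show PySem.Chars.splitOn.go ['/'] fuel rest [] (cur.reverse :: acc) = _
        rw [ih fuel [] (cur.reverse :: acc) (by simpa using hf)]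
        have hrest : PySem.Chars.splitOn rest ['/'] =
            rest.takeWhile (· ≠ '/') ::
              (if '/' ∈ rest then PySem.Chars.splitOn ((rest.dropWhile (· ≠ '/')).tail) ['/'] else []) := by
          have := ih (rest.length + 1) [] [] (by omega)
          simpa [PySem.Chars.splitOn] using this
        simp [List.takeWhile, List.dropWhile, hrest]
      · rw [PySem.Chars.splitOn.go]
        have hpre : (['/'].isPrefixOf (c :: rest)) = false := by
          simp [List.isPrefixOf, Ne.symm hc]
        simp only [hpre, Bool.false_eq_true, if_false]
        rw [ih fuel (c :: cur) acc (by simpa using Nat.le_of_succ_le_succ hf)]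
        by_cases hm : '/' ∈ rest
        · have : '/' ∈ c :: rest := List.mem_cons_of_mem c hm
          simp [hm, this, List.takeWhile_cons, List.dropWhile_cons]
          exact ⟨hc, by simp [hc]⟩
        · have : '/' ∉ c :: rest := by simp [hm, Ne.symm hc]
          simp [hm, this, hc]

theorem pv_splitOn_of_not_mem (cs : List Char) (h : '/' ∉ cs) :
    PySem.Chars.splitOn cs ['/'] = [cs] := by
  unfold PySem.Chars.splitOn
  rw [pv_goSplit cs (cs.length + 1) [] [] (by omega)]
  rw [if_neg h]
  simp only [List.reverse_nil, List.nil_append, pv_takeWhile_of_not_mem cs h]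

theorem pv_splitOn_of_mem (cs : List Char) (h : '/' ∈ cs) :
    PySem.Chars.splitOn cs ['/'] =
      cs.takeWhile (· ≠ '/') :: PySem.Chars.splitOn ((cs.dropWhile (· ≠ '/')).tail) ['/'] := by
  unfold PySem.Chars.splitOn
  rw [pv_goSplit cs (cs.length + 1) [] [] (by omega)]
  simp only [if_pos h, List.reverse_nil, List.nil_append]
  rfl

theorem pv_join_splitOn (cs : List Char) :
    PySem.Chars.join ['/'] (PySem.Chars.splitOn cs ['/']) = cs := by
  induction hn : cs.length using Nat.strong_induction_on generalizing cs with
  | _ n ih =>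
  by_cases h : '/' ∈ cs
  · rw [pv_splitOn_of_mem cs h]
    have htail := pv_tail_lt cs h
    have hrec := ih ((cs.dropWhile (· ≠ '/')).tail).length (hn ▸ htail) _ rfl
    rcases hcons : PySem.Chars.splitOn ((cs.dropWhile (· ≠ '/')).tail) ['/'] with _ | ⟨p, t⟩
    · exact absurd hcons (by
        by_cases h2 : '/' ∈ (cs.dropWhile (· ≠ '/')).tail
        · rw [pv_splitOn_of_mem _ h2]; simp
        · rw [pv_splitOn_of_not_mem _ h2]; simp)
    · rw [hcons] at hrec
      show PySem.Chars.join ['/'] (cs.takeWhile (· ≠ '/') :: p :: t) = cs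
      have hj : PySem.Chars.join ['/'] (cs.takeWhile (· ≠ '/') :: p :: t) =
          cs.takeWhile (· ≠ '/') ++ '/' :: PySem.Chars.join ['/'] (p :: t) := by
        simp [PySem.Chars.join, List.intercalate, List.intersperse]
      rw [hj, hrec]
      exact pv_decomp cs h
  · rw [pv_splitOn_of_not_mem cs h]
    simp [PySem.Chars.join, List.intercalate]

theorem pv_main (cs : List Char) : pvGoA cs = pvGoB (PySem.Chars.splitOn cs ['/']) := by
  induction hn : cs.length using Nat.strong_induction_on generalizing cs with
  | _ n ih =>
  by_cases h : '/' ∈ cs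
  · rw [pv_splitOn_of_mem cs h]
    rw [pvGoA, pvGoB]
    have hcand : PySem.Chars.join ['/']
        (cs.takeWhile (· ≠ '/') :: PySem.Chars.splitOn ((cs.dropWhile (· ≠ '/')).tail) ['/']) = cs := by
      rw [← pv_splitOn_of_mem cs h]
      exact pv_join_splitOn cs
    rw [hcand]
    have hIsIn : PySem.Chars.isIn ['/'] cs = true := (pv_isIn_slash cs).mpr h
    have hbare : (PySem.List.pyGet? (PySem.Chars.splitOnMax cs ['/'] 1) 1).getD []
        = (cs.dropWhile (· ≠ '/')).tail := by
      rw [pv_splitOnMax1_of_mem cs h]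
      simp [PySem.List.pyGet?, PySem.List.pyIdx?]
    have hrec : pvGoA ((cs.dropWhile (· ≠ '/')).tail)
        = pvGoB (PySem.Chars.splitOn ((cs.dropWhile (· ≠ '/')).tail) ['/']) :=
      ih ((cs.dropWhile (· ≠ '/')).tail).length (hn ▸ pv_tail_lt cs h) _ rfl
    cases pvModelContextWindows.get? cs with
    | some v => rfl
    | none =>
      cases pvModelContextWindows.items.find? (fun p => PySem.Chars.startswith cs p.1) with
      | some p => rfl
      | none =>
        simp only [hIsIn, dif_pos, hbare]
        exact hrec
  · rw [pv_splitOn_of_not_mem cs h]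
    rw [pvGoA, pvGoB]
    have hcand : PySem.Chars.join ['/'] [cs] = cs := by
      simp [PySem.Chars.join, List.intercalate]
    rw [hcand]
    have hIsIn : PySem.Chars.isIn ['/'] cs = false := by
      rw [← Bool.not_eq_true]
      exact fun hx => h ((pv_isIn_slash cs).mp hx)
    cases pvModelContextWindows.get? cs with
    | some v => rfl
    | none =>
      cases pvModelContextWindows.items.find? (fun p => PySem.Chars.startswith cs p.1) with
      | some p => rfl
      | none => simp only [hIsIn, Bool.false_eq_true, dif_neg, not_false_iff]; rfl

-- ===== VERDICT (by name: the statement is the Claim_ definition above) =====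
theorem get_context_window_py_spec : Claim_equal_get_context_window_py := by
  intro model _
  unfold Spec_get_context_window_py get_context_window_py get_context_window_py_alt
  exact pv_main model.toList
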